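-- pv_equiv track=rewrite | github.com/yangpuhai/OSTOD | OSTOD/eval.py | state_trans
-- ===== SOURCE A (Python) =====
-- def state_trans(state):
--     state_domain = {}
--     for slot_info, value in state.items():
--         # if slot_info == 'hotel-type' and value == 'hotel':
--         #     continue
--         domain, slot = slot_info.split('-')
--         if domain not in state_domain:
--             state_domain[domain] = {}
--         state_domain[domain][slot] = value
--     return state_domain
-- ===== SOURCE B (Python) =====
-- def state_trans(state):
--     # Pass 1: parse every key once (same 2-tuple unpacking as A: malformed keys raise ValueError).
--     triples = []
--     for key, value in state.items():
--         domain, slot = key.split('-')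
--         triples.append((domain, slot, value))
--     # Pass 2: distinct domains in first-occurrence order, then one dict comprehension per domain.
--     domains = dict.fromkeys(d for d, _, _ in triples)
--     return {d: {s: v for dd, s, v in triples if dd == d} for d in domains}
-- ===== Notes on version B (the rewrite author's own statement) =====
-- stated objective: alternative
-- what changed: A builds a nested dict by mutating per-domain sub-dicts inside one loop; B parses all keys in one pass into (domain, slot, value) triples, takes the distinct domains in first-occurrence order, and assembles the result with one dict comprehension per domain.
import Mathlib
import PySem

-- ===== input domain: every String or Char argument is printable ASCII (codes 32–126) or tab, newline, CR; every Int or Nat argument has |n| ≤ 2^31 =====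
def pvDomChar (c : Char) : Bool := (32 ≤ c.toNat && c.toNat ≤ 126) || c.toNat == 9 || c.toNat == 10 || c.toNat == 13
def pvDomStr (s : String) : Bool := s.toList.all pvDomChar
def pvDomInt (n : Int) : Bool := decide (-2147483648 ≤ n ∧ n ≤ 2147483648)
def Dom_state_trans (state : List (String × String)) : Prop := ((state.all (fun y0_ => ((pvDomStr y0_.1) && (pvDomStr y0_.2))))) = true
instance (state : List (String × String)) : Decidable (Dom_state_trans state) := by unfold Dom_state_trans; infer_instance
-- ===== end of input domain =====

-- B regroups the items in two clean passes (parse once, then one comprehension per distinct domain)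
-- instead of A's nested mutable-dict updates; same return value, objective: alternative decomposition.

-- ===== PORT A =====
def state_trans (state : List (String × String)) : List (String × List (String × String)) :=
  let state_domain :=
    state.foldl (fun state_domain kv =>
      match PySem.Str.split? kv.1 "-" with
      | some [domain, slot] =>
        let state_domain :=
          if state_domain.contains domain then state_domain
          else state_domain.insert domain PySem.Dict.empty
        state_domain.insert domain
          ((state_domain.getD domain PySem.Dict.empty).insert slot kv.2)
      | _ => state_domain)  -- split('-') did not give 2 parts: Python raises ValueError (outside Pre_)
      (PySem.Dict.empty : PySem.Dict String (PySem.Dict String String))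
  state_domain.items.map (fun p => (p.1, p.2.items))

-- ===== PORT B =====
def state_trans_alt (state : List (String × String)) : List (String × List (String × String)) :=
  let triples :=
    state.foldl (fun acc kv =>
      match PySem.Str.split? kv.1 "-" with
      | none => acc
      | some [] => acc  -- these three arms: 2-tuple unpacking raises ValueError (outside Pre_)
      | some [_] => acc
      | some (domain :: slot :: tail) =>
          if tail.isEmpty then acc ++ [(domain, slot, kv.2)] else acc)
      ([] : List (String × String × String))
  let domains := PySem.List.dedup (triples.map (fun t => t.1))
  domains.map (fun d =>
    (d, ((triples.filter (fun t => t.1 == d)).foldl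
          (fun inner t => inner.insert t.2.1 t.2.2)
          (PySem.Dict.empty : PySem.Dict String String)).items))

-- ===== PRECONDITION & SPEC =====
-- Pre_ excludes exactly the inputs with a key on which key.split('-') does not give exactly
-- 2 parts: there Python A (and B) raise ValueError from the 2-tuple unpacking.
def Pre_state_trans (state : List (String × String)) : Prop :=
  ∀ p ∈ state, ((PySem.Str.split? p.1 "-").getD []).length = 2
instance (state : List (String × String)) : Decidable (Pre_state_trans state) := by
  unfold Pre_state_trans; infer_instance

def pvWitness_state_trans : (List (String × String)) :=
  [("hotel-type", "hotel"), ("hotel-area", "north"), ("train-day", "monday")]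

def Spec_state_trans (state : List (String × String)) (out : List (String × List (String × String))) : Prop := out = state_trans_alt state
instance (state : List (String × String)) (out : List (String × List (String × String))) : Decidable (Spec_state_trans state out) := by unfold Spec_state_trans; infer_instance

-- ===== CLAIM (what is proved, stated in full; the proofs are below) =====
def Claim_equal_state_trans : Prop := ∀ (state : List (String × String)), Dom_state_trans state → Pre_state_trans state → Spec_state_trans state (state_trans state)

-- ===== LEMMAS AND PROOFS =====

-- parse one item the way both Pythons do (key.split('-') unpacked into exactly two names)
def pvParse (kv : String × String) : Option (String × String × String) :=
  match PySem.Str.split? kv.1 "-" with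
  | some [domain, slot] => some (domain, slot, kv.2)
  | _ => none

-- A's loop body on a parsed triple
def pvStepA (sd : PySem.Dict String (PySem.Dict String String)) (t : String × String × String) :
    PySem.Dict String (PySem.Dict String String) :=
  let sd' := if sd.contains t.1 then sd else sd.insert t.1 PySem.Dict.empty
  sd'.insert t.1 ((sd'.getD t.1 PySem.Dict.empty).insert t.2.1 t.2.2)

-- B's inner dict for one domain
def pvInner (l : List (String × String × String)) (d : String) : PySem.Dict String String :=
  (l.filter (fun t => t.1 == d)).foldl (fun inner t => inner.insert t.2.1 t.2.2) PySem.Dict.empty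

theorem pvFoldA_eq (state : List (String × String))
    (sd : PySem.Dict String (PySem.Dict String String)) :
    state.foldl (fun state_domain kv =>
      match PySem.Str.split? kv.1 "-" with
      | some [domain, slot] =>
        let state_domain :=
          if state_domain.contains domain then state_domain
          else state_domain.insert domain PySem.Dict.empty
        state_domain.insert domain
          ((state_domain.getD domain PySem.Dict.empty).insert slot kv.2)
      | _ => state_domain) sd
    = (state.filterMap pvParse).foldl pvStepA sd := by
  induction state generalizing sd with
  | nil => rfl
  | cons kv rest ih =>
    simp only [List.foldl_cons, List.filterMap_cons]
    unfold pvParse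
    rcases h : PySem.Str.split? kv.1 "-" with _ | l
    · simp only [ih]; rfl
    · match l with
      | [] => simp only [ih]; rfl
      | [d] => simp only [ih]; rfl
      | [d, s] => simp only [List.foldl_cons, ih]; rfl
      | d :: s :: x :: r => simp only [ih]; rfl

theorem pvFoldB_eq (state : List (String × String))
    (acc : List (String × String × String)) :
    state.foldl (fun acc kv =>
      match PySem.Str.split? kv.1 "-" with
      | none => acc
      | some [] => acc
      | some [_] => acc
      | some (domain :: slot :: tail) =>
          if tail.isEmpty then acc ++ [(domain, slot, kv.2)] else acc) acc
    = acc ++ state.filterMap pvParse := by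
  induction state generalizing acc with
  | nil => simp
  | cons kv rest ih =>
    simp only [List.foldl_cons, List.filterMap_cons]
    unfold pvParse
    rcases h : PySem.Str.split? kv.1 "-" with _ | l
    · simp only [ih]; rfl
    · match l with
      | [] => simp only [ih]; rfl
      | [d] => simp only [ih]; rfl
      | [d, s] =>
        rw [ih]
        show acc ++ [(d, s, kv.2)] ++ List.filterMap pvParse rest = _
        rw [List.append_assoc]; rfl
      | d :: s :: x :: r => simp only [ih]; rfl

theorem pvInner_append (l : List (String × String × String)) (t : String × String × String)
    (d : String) :
    pvInner (l ++ [t]) d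
      = if t.1 = d then (pvInner l d).insert t.2.1 t.2.2 else pvInner l d := by
  unfold pvInner
  rw [List.filter_append, List.foldl_append]
  by_cases h : t.1 = d
  · simp [h]
  · simp [h]

theorem pvInner_of_not_mem (l : List (String × String × String)) (d : String)
    (h : d ∉ l.map (fun t => t.1)) : pvInner l d = PySem.Dict.empty := by
  unfold pvInner
  have : l.filter (fun t => t.1 == d) = [] := by
    rw [List.filter_eq_nil_iff]
    intro t ht hbe
    exact h (List.mem_map.mpr ⟨t, ht, by simpa using hbe⟩)
  rw [this]; rfl

-- core invariant: A's nested-dict fold produces exactly B's (domain, inner-dict) table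
theorem pvStepA_of_contains (sd : PySem.Dict String (PySem.Dict String String))
    (t : String × String × String) (hc : sd.contains t.1 = true) :
    pvStepA sd t = sd.insert t.1 ((sd.getD t.1 PySem.Dict.empty).insert t.2.1 t.2.2) := by
  unfold pvStepA; simp [hc]

theorem pvStepA_of_not_contains (sd : PySem.Dict String (PySem.Dict String String))
    (t : String × String × String) (hc : sd.contains t.1 = false) :
    pvStepA sd t
      = sd.insert t.1 ((PySem.Dict.empty : PySem.Dict String String).insert t.2.1 t.2.2) := by
  unfold pvStepA
  simp only [hc, Bool.false_eq_true, if_false, PySem.Dict.getD_insert_self,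
    PySem.Dict.insert_insert_self]

theorem pvCore (l : List (String × String × String)) :
    (l.foldl pvStepA PySem.Dict.empty).items
      = (PySem.Set.ofList (l.map (fun t => t.1))).map (fun d => (d, pvInner l d)) := by
  induction l using List.reverseRecOn with
  | nil => rfl
  | append_singleton l t ih =>
    have hkeys : (l.foldl pvStepA PySem.Dict.empty).keys
        = PySem.Set.ofList (l.map (fun t => t.1)) := by
      show (l.foldl pvStepA PySem.Dict.empty).items.map Prod.fst = _
      rw [ih, List.map_map]; simp [Function.comp_def]
    have hnodup : (l.foldl pvStepA PySem.Dict.empty).keys.Nodup := by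
      rw [hkeys]; exact PySem.Set.nodup_ofList _
    rw [List.foldl_append, List.foldl_cons, List.foldl_nil, List.map_append,
        List.map_cons, List.map_nil, PySem.Set.ofList_append_singleton]
    by_cases hmem : t.1 ∈ l.map (fun t => t.1)
    · -- domain already present
      have hc : (l.foldl pvStepA PySem.Dict.empty).contains t.1 = true := by
        rw [PySem.Dict.contains_iff_mem_keys, hkeys, PySem.Set.mem_ofList]; exact hmem
      have hadd : (PySem.Set.ofList (l.map (fun t => t.1))).add t.1
          = PySem.Set.ofList (l.map (fun t => t.1)) :=
        PySem.Set.add_of_mem (by rw [PySem.Set.mem_ofList]; exact hmem)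
      have hgetD : (l.foldl pvStepA PySem.Dict.empty).getD t.1 PySem.Dict.empty
          = pvInner l t.1 := by
        apply PySem.Dict.getD_of_mem_items _ _ hnodup
        rw [ih]
        exact List.mem_map.mpr ⟨t.1, by rw [PySem.Set.mem_ofList]; exact hmem, rfl⟩
      rw [pvStepA_of_contains _ _ hc, hgetD, PySem.Dict.items_insert_of_contains _ _ hc, ih,
          hadd, List.map_map]
      apply List.map_congr_left
      intro d _
      by_cases hd : d = t.1
      · subst hd
        simp only [Function.comp_apply, beq_self_eq_true, if_pos, pvInner_append]
      · have h1 : ¬ t.1 = d := fun h => hd h.symm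
        show (fun p => if (p.1 == t.1) = true then (t.1, (pvInner l t.1).insert t.2.1 t.2.2) else p)
            (d, pvInner l d) = (d, pvInner (l ++ [t]) d)
        simp [pvInner_append, hd, h1]
    · -- new domain
      have hc : (l.foldl pvStepA PySem.Dict.empty).contains t.1 = false := by
        rw [Bool.eq_false_iff]
        intro hcc
        rw [PySem.Dict.contains_iff_mem_keys, hkeys, PySem.Set.mem_ofList] at hcc
        exact hmem hcc
      have hadd : (PySem.Set.ofList (l.map (fun t => t.1))).add t.1
          = PySem.Set.ofList (l.map (fun t => t.1)) ++ [t.1] :=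
        PySem.Set.add_of_not_mem (by rw [PySem.Set.mem_ofList]; exact hmem)
      rw [pvStepA_of_not_contains _ _ hc, PySem.Dict.items_insert_of_not_contains _ _ hc, ih,
          hadd, List.map_append]
      congr 1
      · apply List.map_congr_left
        intro d hd
        rw [PySem.Set.mem_ofList] at hd
        have h1 : ¬ t.1 = d := by rintro rfl; exact hmem hd
        rw [pvInner_append]
        simp [h1]
      · simp [pvInner_append, pvInner_of_not_mem l t.1 hmem]

-- ===== VERDICT (by name: the statement is the Claim_ definition above) =====
theorem state_trans_spec : Claim_equal_state_trans := by
  intro state _ _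
  show state_trans state = state_trans_alt state
  simp only [state_trans, state_trans_alt]
  rw [pvFoldA_eq, pvFoldB_eq, List.nil_append, pvCore]
  have hded : PySem.List.dedup ((state.filterMap pvParse).map (fun t => t.1))
      = PySem.Set.ofList ((state.filterMap pvParse).map (fun t => t.1)) := rfl
  rw [List.map_map, hded]
  apply List.map_congr_left
  intro d _
  show (d, (pvInner (state.filterMap pvParse) d).items) = _
  rfl
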